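-- pv_equiv track=rewrite | github.com/yufchen/Multi-DeepRMSA | ONOS_Project/DRL_py/src/CTRLler_main.py | mark_vector
-- ===== SOURCE A (Python) =====
-- def mark_vector(vector, default):
--     le = len(vector)
--     flag = 0
--     slotscontinue = []
--     slotflag = []
--
--     ii = 0
--     while ii <= le - 1:
--         tempvector = vector[ii:le]
--         default_counts = tempvector.count(default)
--         if default_counts == 0:
--             break
--         else:
--             a = tempvector.index(default)
--             ii += a
--             flag += 1
--             slotflag.append(ii)
--             m = vector[ii + 1:le]
--             m_counts = m.count(1 - default)
--             if m_counts != 0: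
--                 n = m.index(1 - default)
--                 slotcontinue = n + 1
--                 slotscontinue.append(slotcontinue)
--                 ii += slotcontinue
--             else:
--                 slotscontinue.append(le - ii)
--                 break
--     return flag, slotflag, slotscontinue
-- ===== SOURCE B (Python) =====
-- def mark_vector(vector, default):
--     other = 1 - default
--     slotflag = []
--     slotscontinue = []
--     start = None
--     for i, v in enumerate(vector):
--         if start is None:
--             if v == default:
--                 slotflag.append(i)
--                 start = i
--         else:
--             if v == other:
--                 slotscontinue.append(i - start)
--                 start = None
--     if start is not None:
--         slotscontinue.append(len(vector) - start)
--     return len(slotflag), slotflag, slotscontinue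
-- ===== Notes on version B (the rewrite author's own statement) =====
-- stated objective: alternative
-- what changed: Replaced the while-loop that repeatedly counts/indexes whole suffix slices with a single left-to-right state-machine scan that tracks whether a run is open and its start index.
import Mathlib
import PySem

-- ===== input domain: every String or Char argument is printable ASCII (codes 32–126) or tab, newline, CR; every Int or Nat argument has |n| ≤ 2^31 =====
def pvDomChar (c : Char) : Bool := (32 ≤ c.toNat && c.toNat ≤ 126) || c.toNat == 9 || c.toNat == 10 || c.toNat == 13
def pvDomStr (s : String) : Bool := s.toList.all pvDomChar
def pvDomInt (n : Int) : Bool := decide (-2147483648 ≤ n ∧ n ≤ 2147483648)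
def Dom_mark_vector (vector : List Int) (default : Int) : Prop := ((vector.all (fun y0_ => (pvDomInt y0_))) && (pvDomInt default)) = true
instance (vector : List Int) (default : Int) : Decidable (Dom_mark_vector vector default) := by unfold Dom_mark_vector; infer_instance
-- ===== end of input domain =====

-- B: a single left-to-right state-machine scan over the vector, instead of A's while-loop that repeatedly counts/indexes suffix slices; same return value everywhere.

-- ===== PORT A =====
-- A's while-loop: state (ii, flag, slotflag, slotscontinue); the unreachable `none`
-- branches correspond to `.index` calls guarded by a non-zero `.count`.
def markLoop (vector : List Int) (default : Int) (le : Int)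
    (ii flag : Int) (slotflag slotscontinue : List Int) :
    Int × List Int × List Int :=
  if _h : ii ≤ le - 1 then
    let tempvector := PySem.List.slice vector (some ii) (some le)
    let default_counts := PySem.List.count tempvector default
    if default_counts = 0 then (flag, slotflag, slotscontinue)
    else
      match PySem.List.index? tempvector default with
      | none => (flag, slotflag, slotscontinue)  -- unreachable: count ≠ 0
      | some a =>
        let ii2 := ii + (a : Int)
        let flag2 := flag + 1
        let slotflag2 := slotflag ++ [ii2]
        let m := PySem.List.slice vector (some (ii2 + 1)) (some le)
        let m_counts := PySem.List.count m (1 - default)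
        if m_counts ≠ 0 then
          match PySem.List.index? m (1 - default) with
          | none => (flag2, slotflag2, slotscontinue)  -- unreachable: count ≠ 0
          | some n =>
            markLoop vector default le (ii2 + ((n : Int) + 1)) flag2 slotflag2
              (slotscontinue ++ [(n : Int) + 1])
        else (flag2, slotflag2, slotscontinue ++ [le - ii2])
  else (flag, slotflag, slotscontinue)
termination_by (le - ii).toNat
decreasing_by simp_wf; omega

def mark_vector (vector : List Int) (default : Int) : Int × List Int × List Int :=
  markLoop vector default (vector.length : Int) 0 0 [] []

-- ===== PORT B =====
-- Source B's for-loop over enumerate(vector) as structural recursion on the list,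
-- carrying the index i and the state (start, slotflag, slotscontinue).
def scanRuns (default other : Int) (l : List Int) (i : Int)
    (start : Option Int) (sf sc : List Int) :
    Option Int × List Int × List Int :=
  match l with
  | [] => (start, sf, sc)
  | v :: rest =>
    match start with
    | none =>
      if v = default then scanRuns default other rest (i + 1) (some i) (sf ++ [i]) sc
      else scanRuns default other rest (i + 1) none sf sc
    | some s =>
      if v = other then scanRuns default other rest (i + 1) none sf (sc ++ [i - s])
      else scanRuns default other rest (i + 1) (some s) sf sc

-- Source B's post-loop code: close a still-open run, return (len(slotflag), …).
def finishRuns (le : Int) (r : Option Int × List Int × List Int) :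
    Int × List Int × List Int :=
  match r with
  | (some s, sf, sc) => ((sf.length : Int), sf, sc ++ [le - s])
  | (none, sf, sc) => ((sf.length : Int), sf, sc)

def mark_vector_alt (vector : List Int) (default : Int) : Int × List Int × List Int :=
  finishRuns (vector.length : Int)
    (scanRuns default (1 - default) vector 0 none [] [])

-- ===== PRECONDITION & SPEC =====
def Spec_mark_vector (vector : List Int) (default : Int) (out : Int × List Int × List Int) : Prop := out = mark_vector_alt vector default
instance (vector : List Int) (default : Int) (out : Int × List Int × List Int) : Decidable (Spec_mark_vector vector default out) := by unfold Spec_mark_vector; infer_instance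

-- ===== CLAIM (what is proved, stated in full; the proofs are below) =====
def Claim_equal_mark_vector : Prop := ∀ (vector : List Int) (default : Int), Dom_mark_vector vector default → Spec_mark_vector vector default (mark_vector vector default)

-- ===== LEMMAS AND PROOFS =====

lemma scan_none_skip (default other : Int) (pre rest : List Int) (i : Int)
    (sf sc : List Int) (h : ∀ x ∈ pre, x ≠ default) :
    scanRuns default other (pre ++ rest) i none sf sc
      = scanRuns default other rest (i + pre.length) none sf sc := by
  induction pre generalizing i with
  | nil => simp
  | cons x xs ih =>
    have hx : x ≠ default := h x (by simp)
    simp only [List.cons_append, scanRuns, if_neg hx]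
    rw [ih _ (fun y hy => h y (by simp [hy]))]
    congr 1
    simp only [List.length_cons]
    push_cast
    ring

lemma scan_some_skip (default other s : Int) (pre rest : List Int) (i : Int)
    (sf sc : List Int) (h : ∀ x ∈ pre, x ≠ other) :
    scanRuns default other (pre ++ rest) i (some s) sf sc
      = scanRuns default other rest (i + pre.length) (some s) sf sc := by
  induction pre generalizing i with
  | nil => simp
  | cons x xs ih =>
    have hx : x ≠ other := h x (by simp)
    simp only [List.cons_append, scanRuns, if_neg hx]
    rw [ih _ (fun y hy => h y (by simp [hy]))]
    congr 1
    simp only [List.length_cons]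
    push_cast
    ring

lemma scan_none_all (default other : Int) (l : List Int) (i : Int)
    (sf sc : List Int) (h : ∀ x ∈ l, x ≠ default) :
    scanRuns default other l i none sf sc = (none, sf, sc) := by
  have := scan_none_skip default other l [] i sf sc h
  simpa using this

lemma scan_some_all (default other s : Int) (l : List Int) (i : Int)
    (sf sc : List Int) (h : ∀ x ∈ l, x ≠ other) :
    scanRuns default other l i (some s) sf sc = (some s, sf, sc) := by
  have := scan_some_skip default other s l [] i sf sc h
  simpa using this

-- main invariant: from any position ii, A's loop computes what B's scan (started
-- at the same position, outside a run) computes, provided flag = |slotflag|.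
lemma markLoop_eq (k : Nat) (vector : List Int) (default : Int)
    (ii flag : Int) (sf sc : List Int)
    (hk : ((vector.length : Int) - ii).toNat ≤ k)
    (hii : 0 ≤ ii) (hflag : flag = (sf.length : Int)) :
    markLoop vector default (vector.length : Int) ii flag sf sc
      = finishRuns (vector.length : Int)
          (scanRuns default (1 - default) (vector.drop ii.toNat) ii none sf sc) := by
  induction k generalizing ii flag sf sc with
  | zero =>
    have hge : (vector.length : Int) ≤ ii := by omega
    rw [markLoop]
    rw [dif_neg (by omega)]
    have hdrop : vector.drop ii.toNat = [] := by
      apply List.drop_eq_nil_of_le; omega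
    rw [hdrop]
    simp [scanRuns, finishRuns, hflag]
  | succ k ih =>
    by_cases hlt : ii ≤ (vector.length : Int) - 1
    · -- loop body
      have hiilt : ii.toNat < vector.length := by omega
      have htemp : PySem.List.slice vector (some ii) (some (vector.length : Int))
          = vector.drop ii.toNat := by
        rw [PySem.List.slice_toNat vector hii (by positivity)]
        apply List.take_of_length_le
        simp [Int.toNat_natCast]
      set d := vector.drop ii.toNat with hd
      rw [markLoop, dif_pos hlt, htemp]
      by_cases hc : PySem.List.count d default = 0
      · -- no default left: both sides stop
        rw [if_pos hc]
        have hnin : default ∉ d := by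
          rwa [PySem.List.count_eq, List.count_eq_zero] at hc
        rw [scan_none_all _ _ _ _ _ _ (fun x hx => by rintro rfl; exact hnin hx)]
        simp [finishRuns, hflag]
      · rw [if_neg hc]
        have hmem : default ∈ d := by
          by_contra hni
          exact hc (by rwa [PySem.List.count_eq, List.count_eq_zero])
        obtain ⟨a, ha⟩ := Option.isSome_iff_exists.mp
          ((PySem.List.index?_isSome_iff d default).mpr hmem)
        rw [ha]
        simp only []
        obtain ⟨pre, suf, hsplit, hlen, hpre⟩ :=
          (PySem.List.index?_eq_some_iff d default a).mp ha
        -- B skips pre, then consumes the default at position ii + a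
        have hB1 : scanRuns default (1 - default) d ii none sf sc
            = scanRuns default (1 - default) suf (ii + (a : Int) + 1)
                (some (ii + (a : Int))) (sf ++ [ii + (a : Int)]) sc := by
          rw [hsplit, scan_none_skip _ _ _ _ _ _ _
            (fun x hx => by rintro rfl; exact hpre hx), hlen]
          simp [scanRuns]
        -- the A-side slice m equals suf
        have hsufdrop : suf = vector.drop (ii + (a : Int) + 1).toNat := by
          have : d.drop (a + 1) = suf := by
            rw [hsplit, ← hlen]
            simp
          rw [← this, hd, List.drop_drop]
          congr 1
          omega
        have hm : PySem.List.slice vector (some (ii + (a : Int) + 1))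
            (some (vector.length : Int)) = suf := by
          rw [PySem.List.slice_toNat vector (by omega) (by positivity), ← hsufdrop]
          apply List.take_of_length_le
          simp [hsufdrop, Int.toNat_natCast]
        rw [hm]
        by_cases hmc : PySem.List.count suf (1 - default) = 0
        · -- run reaches the end of the vector
          rw [if_neg (by simpa using hmc)]
          have hnin : (1 - default) ∉ suf := by
            rwa [PySem.List.count_eq, List.count_eq_zero] at hmc
          rw [hB1, scan_some_all _ _ _ _ _ _ _
            (fun x hx => by rintro rfl; exact hnin hx)]
          simp [finishRuns, hflag]
        · rw [if_pos (by simpa using hmc)]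
          have hmem2 : (1 - default) ∈ suf := by
            by_contra hni
            exact hmc (by rwa [PySem.List.count_eq, List.count_eq_zero])
          obtain ⟨n, hn⟩ := Option.isSome_iff_exists.mp
            ((PySem.List.index?_isSome_iff suf (1 - default)).mpr hmem2)
          rw [hn]
          simp only []
          obtain ⟨pre2, suf2, hsplit2, hlen2, hpre2⟩ :=
            (PySem.List.index?_eq_some_iff suf (1 - default) n).mp hn
          set ii' := ii + (a : Int) + ((n : Int) + 1) with hii'
          have hne : (1 - default) ≠ default := by omega
          -- B skips pre2 and closes the run at the (1 - default) element
          have hB2 : scanRuns default (1 - default) suf (ii + (a : Int) + 1)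
                (some (ii + (a : Int))) (sf ++ [ii + (a : Int)]) sc
              = scanRuns default (1 - default) ((1 - default) :: suf2) ii' none
                  (sf ++ [ii + (a : Int)]) (sc ++ [(n : Int) + 1]) := by
            rw [hsplit2, show pre2 ++ (1 - default) :: suf2
                = pre2 ++ ((1 - default) :: suf2) by simp]
            rw [scan_some_skip _ _ _ _ _ _ _ _
              (fun x hx => by rintro rfl; exact hpre2 hx), hlen2]
            have h1 : ii + (a : Int) + 1 + (n : Int) = ii' := by omega
            rw [h1]
            have h2 : ii' - (ii + (a : Int)) = (n : Int) + 1 := by omega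
            simp [scanRuns, hne, h2]
          have hdrop' : vector.drop ii'.toNat = (1 - default) :: suf2 := by
            have : suf.drop n = (1 - default) :: suf2 := by
              rw [hsplit2, ← hlen2]
              simp
            rw [← this, hsufdrop, List.drop_drop]
            congr 1
            omega
          rw [hB1, hB2]
          rw [ih ii' (flag + 1) (sf ++ [ii + (a : Int)]) (sc ++ [(n : Int) + 1])
            (by omega) (by omega) (by simp [hflag])]
          rw [hdrop']
    · -- loop guard fails
      rw [markLoop, dif_neg hlt]
      have hdrop : vector.drop ii.toNat = [] := by
        apply List.drop_eq_nil_of_le; omega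
      rw [hdrop]
      simp [scanRuns, finishRuns, hflag]

-- ===== VERDICT (by name: the statement is the Claim_ definition above) =====
theorem mark_vector_spec : Claim_equal_mark_vector := by
  intro vector default _
  unfold Spec_mark_vector mark_vector mark_vector_alt
  rw [markLoop_eq ((vector.length : Int) - 0).toNat vector default 0 0 [] []
    le_rfl le_rfl (by simp)]
  simp
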